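-- pv_equiv track=rewrite | github.com/hoo01/CS61A | disc03/sevens.py | sevens
-- ===== SOURCE A (Python) =====
-- def sevens(n,k):
--     assert type(n) == int and type(k) == int, "n and k must be integers"
--     assert n >= 1 and k >= 1, "n and k must be greater than or equal to 1"
--
--     def has_seven(i):
--         if i % 7 == 0:
--             return True
--         while i > 0:  # 只要 x 还有 k 位以上
--             last = i % 10  # 取最右边的数字
--             if last == 7:
--                 return True
--             i = i // 10  # 去掉最低位，继续比较
--         return False
--
--     direction = 1
--     i = 1 #起始数字
--     who = 1 #起始玩家
--
--     while i < n:
--         if has_seven(i):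
--             direction = -direction
--         who = (who + direction - 1) % k + 1
--         i += 1
--
--     return who
-- ===== SOURCE B (Python) =====
-- def sevens(n, k):
--     assert type(n) == int and type(k) == int, "n and k must be integers"
--     assert n >= 1 and k >= 1, "n and k must be greater than or equal to 1"
--     # odometer: digits of i (least significant first), count of digit 7s, i % 7
--     digits = [1]
--     c7 = 0
--     m = 1 % 7
--     direction = 1
--     total = 0  # sum of directions applied so far
--     for _ in range(1, n):
--         if c7 > 0 or m == 0:
--             direction = -direction
--         total += direction
--         # increment the odometer so digits represent the next i
--         j = 0
--         while j < len(digits) and digits[j] == 9: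
--             digits[j] = 0
--             j += 1
--         if j == len(digits):
--             digits.append(1)
--         else:
--             digits[j] += 1
--             if digits[j] == 7:
--                 c7 += 1
--             elif digits[j] == 8:
--                 c7 -= 1
--         m = (m + 1) % 7
--     return total % k + 1
-- ===== Notes on version B (the rewrite author's own statement) =====
-- stated objective: faster
-- what changed: Replaces the per-step has_seven digit scan and per-step who update by an incrementally maintained odometer (digit list, count of 7-digits, i mod 7) with O(1) amortized flip test, accumulating the total displacement and taking mod k once at the end.
import Mathlib
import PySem

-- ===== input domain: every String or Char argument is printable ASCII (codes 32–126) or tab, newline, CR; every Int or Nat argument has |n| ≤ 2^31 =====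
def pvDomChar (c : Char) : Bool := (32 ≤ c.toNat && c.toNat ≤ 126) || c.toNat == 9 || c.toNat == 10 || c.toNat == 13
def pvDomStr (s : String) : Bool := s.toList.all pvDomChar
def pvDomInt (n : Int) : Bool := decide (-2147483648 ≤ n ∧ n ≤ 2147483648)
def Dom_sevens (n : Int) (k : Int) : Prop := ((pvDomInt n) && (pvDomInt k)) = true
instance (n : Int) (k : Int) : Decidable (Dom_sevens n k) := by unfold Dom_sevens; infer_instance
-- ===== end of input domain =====

-- B maintains the digits of i incrementally (odometer) instead of re-scanning them each step,
-- and accumulates the total displacement, taking mod k once at the end.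

-- ===== PORT A =====
-- the while-loop of A's nested has_seven
def hasSevenLoop (i : Int) : Bool :=
  if _h : 0 < i then
    if PySem.Int.mod i 10 == 7 then true
    else hasSevenLoop (PySem.Int.floordiv i 10)
  else false
termination_by i.toNat
decreasing_by
  simp only [PySem.Int.floordiv_eq_ediv_of_pos (by norm_num : (0:Int) < 10)]
  omega

def hasSeven (i : Int) : Bool :=
  if PySem.Int.mod i 7 == 0 then true else hasSevenLoop i

def sevensLoop (n k direction i who : Int) : Int :=
  if i < n then
    let d := if hasSeven i then -direction else direction
    sevensLoop n k d (i + 1) (PySem.Int.mod (who + d - 1) k + 1)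
  else who
termination_by (n - i).toNat
decreasing_by omega

def sevens (n : Int) (k : Int) : Int := sevensLoop n k 1 1 1

-- ===== PORT B =====
-- odometer increment (Source B's carry while-loop, as recursion over the digit list), tracking the 7-count
def incOdo : List Int → Int → List Int × Int
  | [], c7 => ([1], c7)
  | d :: rest, c7 =>
    if d == 9 then
      let p := incOdo rest c7
      (0 :: p.1, p.2)
    else
      let d' := d + 1
      (d' :: rest, if d' == 7 then c7 + 1 else if d' == 8 then c7 - 1 else c7)

-- state: (digits of i LSD-first, count of 7-digits, i % 7, direction, total displacement)
def sevensStep (st : List Int × Int × Int × Int × Int) : List Int × Int × Int × Int × Int :=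
  let (digits, c7, m, dir, total) := st
  let dir' := if c7 > 0 || m == 0 then -dir else dir
  let p := incOdo digits c7
  (p.1, p.2, PySem.Int.mod (m + 1) 7, dir', total + dir')

def sevens_alt (n : Int) (k : Int) : Int :=
  let st := (PySem.List.pyRange 1 n 1).foldl (fun s _ => sevensStep s)
      ([1], 0, PySem.Int.mod 1 7, 1, 0)
  PySem.Int.mod st.2.2.2.2 k + 1

-- ===== PRECONDITION & SPEC =====
-- A (and B) assert n >= 1 and k >= 1 and raise AssertionError otherwise
def Pre_sevens (n : Int) (k : Int) : Prop := 1 ≤ n ∧ 1 ≤ k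
instance (n : Int) (k : Int) : Decidable (Pre_sevens n k) := by unfold Pre_sevens; infer_instance
def pvWitness_sevens : Int × Int := (8, 3)

def Spec_sevens (n : Int) (k : Int) (out : Int) : Prop := out = sevens_alt n k
instance (n : Int) (k : Int) (out : Int) : Decidable (Spec_sevens n k out) := by unfold Spec_sevens; infer_instance

-- ===== CLAIM (what is proved, stated in full; the proofs are below) =====
def Claim_equal_sevens : Prop := ∀ (n : Int) (k : Int), Dom_sevens n k → Pre_sevens n k → Spec_sevens n k (sevens n k)

-- ===== LEMMAS AND PROOFS =====

-- model: the digits of a natural number, least significant first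
def digitsM : Nat → List Int
  | 0 => []
  | m + 1 => (((m + 1) % 10 : Nat) : Int) :: digitsM ((m + 1) / 10)
decreasing_by exact Nat.div_lt_self (Nat.succ_pos m) (by norm_num)

lemma digitsM_succ (q : Nat) :
    digitsM (q + 1) = (((q + 1) % 10 : Nat) : Int) :: digitsM ((q + 1) / 10) := by
  rw [digitsM]

lemma incOdo_fst (m : Nat) (c : Int) : (incOdo (digitsM m) c).1 = digitsM (m + 1) := by
  induction m using Nat.strong_induction_on with
  | _ m ih =>
    match m with
    | 0 => simp [digitsM, incOdo]
    | Nat.succ m =>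
      rw [digitsM]
      by_cases h9 : (m + 1) % 10 = 9
      · have hb : (((((m + 1) % 10 : Nat)) : Int) == 9) = true := by simp [h9]
        simp only [incOdo, hb, if_true]
        rw [ih ((m + 1) / 10) (Nat.div_lt_self (Nat.succ_pos m) (by norm_num))]
        conv_rhs => rw [digitsM_succ (m + 1)]
        have h1 : (m + 1 + 1) % 10 = 0 := by omega
        have h2 : (m + 1 + 1) / 10 = (m + 1) / 10 + 1 := by omega
        rw [h1, h2]
        simp
      · have hb : (((((m + 1) % 10 : Nat)) : Int) == 9) = false := by
          simp only [beq_iff_eq, Bool.eq_false_iff, ne_eq]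
          intro h; apply h9; exact_mod_cast h
        simp only [incOdo, hb, Bool.false_eq_true, if_false]
        conv_rhs => rw [digitsM_succ (m + 1)]
        have h1 : (m + 1 + 1) % 10 = (m + 1) % 10 + 1 := by omega
        have h2 : (m + 1 + 1) / 10 = (m + 1) / 10 := by omega
        rw [h1, h2]
        simp only [List.cons.injEq]
        exact ⟨by push_cast; ring, trivial⟩

lemma incOdo_snd (ds : List Int) (c : Int) :
    (incOdo ds c).2 = c + ((incOdo ds c).1.count 7 : Int) - (ds.count 7 : Int) := by
  induction ds generalizing c with
  | nil => simp [incOdo]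
  | cons d rest ih =>
    by_cases h9 : d = 9
    · subst h9
      simp only [incOdo, beq_self_eq_true, if_true]
      rw [ih c]
      simp
    · have hb : (d == 9) = false := by simp [h9]
      simp only [incOdo, hb, Bool.false_eq_true, if_false]
      by_cases h7 : d + 1 = 7
      · have hd : d = 6 := by omega
        subst hd
        simp
        push_cast
        ring
      · by_cases h8 : d + 1 = 8
        · have hd : d = 7 := by omega
          subst hd
          simp
          push_cast
          ring
        · have hd7 : d ≠ 7 := by omega
          simp [h7, h8, hd7]

lemma hasSevenLoop_eq (m : Nat) :
    hasSevenLoop (m : Int) = decide (0 < (digitsM m).count 7) := by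
  induction m using Nat.strong_induction_on with
  | _ m ih =>
    match m with
    | 0 => rw [hasSevenLoop]; simp [digitsM]
    | Nat.succ m =>
      rw [hasSevenLoop]
      have hpos : (0 : Int) < ((m + 1 : Nat) : Int) := by exact_mod_cast Nat.succ_pos m
      rw [dif_pos hpos]
      rw [digitsM_succ m]
      have hmod : PySem.Int.mod ((m + 1 : Nat) : Int) 10 = (((m + 1) % 10 : Nat) : Int) := by
        exact_mod_cast PySem.Int.mod_natCast (m + 1) 10
      by_cases h7 : (m + 1) % 10 = 7
      · have hb : (PySem.Int.mod ((m + 1 : Nat) : Int) 10 == 7) = true := by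
          rw [hmod, h7]; rfl
        simp only [hb, if_true]
        rw [h7]
        simp
      · have hb : (PySem.Int.mod ((m + 1 : Nat) : Int) 10 == 7) = false := by
          rw [hmod]
          simp only [beq_eq_false_iff_ne, ne_eq]
          intro h; apply h7; exact_mod_cast h
        simp only [hb, Bool.false_eq_true, if_false]
        have hfd : PySem.Int.floordiv ((m + 1 : Nat) : Int) 10 = (((m + 1) / 10 : Nat) : Int) := by
          exact_mod_cast PySem.Int.floordiv_natCast (m + 1) 10
        rw [hfd, ih ((m + 1) / 10) (Nat.div_lt_self (Nat.succ_pos m) (by norm_num))]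
        have hc : (((((m + 1) % 10 : Nat)) : Int) == 7) = false := by
          simp only [beq_eq_false_iff_ne, ne_eq]
          intro h; apply h7; exact_mod_cast h
        rw [List.count_cons, hc]
        simp

lemma emod_step (total d k : Int) (hk : 0 < k) :
    PySem.Int.mod (PySem.Int.mod total k + 1 + d - 1) k = PySem.Int.mod (total + d) k := by
  rw [PySem.Int.mod_eq_emod_of_pos hk, PySem.Int.mod_eq_emod_of_pos hk,
    PySem.Int.mod_eq_emod_of_pos hk]
  have h : total % k + 1 + d - 1 = (total + d) + k * (-(total / k)) := by
    rw [Int.emod_def]; ring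
  rw [h, Int.add_mul_emod_self_left]

lemma hasSeven_or (i : Int) :
    hasSeven i = ((PySem.Int.mod i 7 == 0) || hasSevenLoop i) := by
  unfold hasSeven
  cases h : (PySem.Int.mod i 7 == 0)
  · simp only [h, Bool.false_eq_true, if_false, Bool.false_or]
  · simp only [if_true, Bool.true_or]

lemma step_eq (i : Nat) (dir total : Int) :
    sevensStep (digitsM i, ((digitsM i).count 7 : Int), PySem.Int.mod (i : Int) 7, dir, total)
      = (digitsM (i + 1), ((digitsM (i + 1)).count 7 : Int), PySem.Int.mod ((i : Int) + 1) 7,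
         (if hasSeven (i : Int) then -dir else dir), total + (if hasSeven (i : Int) then -dir else dir)) := by
  have hcond : ((decide (((digitsM i).count 7 : Int) > 0)) || (PySem.Int.mod (i : Int) 7 == 0))
      = hasSeven (i : Int) := by
    rw [hasSeven_or, hasSevenLoop_eq, Bool.or_comm]
    congr 1
    simp
  have hm : PySem.Int.mod (PySem.Int.mod (i : Int) 7 + 1) 7 = PySem.Int.mod ((i : Int) + 1) 7 := by
    rw [PySem.Int.mod_eq_emod_of_pos (by norm_num : (0:Int) < 7),
      PySem.Int.mod_eq_emod_of_pos (by norm_num : (0:Int) < 7)]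
    conv_rhs => rw [PySem.Int.mod_eq_emod_of_pos (by norm_num : (0:Int) < 7)]
    omega
  have hsnd : (incOdo (digitsM i) ((digitsM i).count 7 : Int)).2
      = ((digitsM (i + 1)).count 7 : Int) := by
    rw [incOdo_snd, incOdo_fst]; ring
  simp only [sevensStep, hcond, hm, incOdo_fst, hsnd]

lemma loop_eq (t : Nat) : ∀ (n k : Int) (i : Nat) (dir total : Int), 0 < k →
    t = (n - (i : Int)).toNat →
    sevensLoop n k dir (i : Int) (PySem.Int.mod total k + 1)
      = PySem.Int.mod (((PySem.List.pyRange (i : Int) n 1).foldl (fun s _ => sevensStep s)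
          (digitsM i, ((digitsM i).count 7 : Int), PySem.Int.mod (i : Int) 7, dir, total)).2.2.2.2) k + 1 := by
  induction t with
  | zero =>
    intro n k i dir total hk ht
    have hni : n ≤ (i : Int) := by omega
    rw [sevensLoop, if_neg (by omega), PySem.List.pyRange_one_eq_nil hni]
    rfl
  | succ t ih =>
    intro n k i dir total hk ht
    have hlt : (i : Int) < n := by omega
    rw [sevensLoop, if_pos hlt]
    show sevensLoop n k (if hasSeven ↑i then -dir else dir) (↑i + 1)
        (PySem.Int.mod (PySem.Int.mod total k + 1 + (if hasSeven ↑i then -dir else dir) - 1) k + 1)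
      = _
    rw [PySem.List.pyRange_one_cons hlt, List.foldl_cons, step_eq]
    rw [emod_step total _ k hk]
    have hcast : (i : Int) + 1 = ((i + 1 : Nat) : Int) := by push_cast; ring
    rw [hcast]
    exact ih n k (i + 1) _ _ hk (by omega)

-- ===== VERDICT (by name: the statement is the Claim_ definition above) =====
theorem sevens_spec : Claim_equal_sevens := by
  intro n k _ hpre
  obtain ⟨hn, hk⟩ := hpre
  have hmod0 : PySem.Int.mod 0 k = 0 := by
    rw [PySem.Int.mod_eq_emod_of_pos (by omega), Int.zero_emod]
  have hd : digitsM 1 = [1] := by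
    rw [show (1 : Nat) = 0 + 1 from rfl, digitsM_succ 0]
    simp [digitsM]
  have hc : (((digitsM 1).count 7 : Int)) = 0 := by rw [hd]; simp
  have h := loop_eq (n - ((1 : Nat) : Int)).toNat n k 1 1 0 (by omega) rfl
  simp only [hd, hc, Nat.cast_one, hmod0, zero_add] at h
  unfold Spec_sevens sevens sevens_alt
  exact h
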